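-- pv_equiv track=rewrite | github.com/teimurjan/codility-solutions | lesson_4/missing_integer.py | find_missing_integer_up
-- ===== SOURCE A (Python) =====
-- def find_missing_integer_up(min, ints):
--     """
--     Args:
--         min (int): Minimum positive integer in arr
--         ints (set): Set of positive integers
--
--     Returns:
--         if found:
--             int: Smallest positive integer greater than min
--         else:
--             None
--     """
--     min_ = min
--     ints_ = ints
--     while min < 1000001:
--         min_ += 1
--         if min_ not in ints_:
--             return min_
--     return None
-- ===== SOURCE B (Python) =====
-- def find_missing_integer_up(min, ints):
--     if min >= 1000001:
--         return None
--     expected = min + 1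
--     for x in sorted(i for i in ints if i > min):
--         if x == expected:
--             expected += 1
--         elif x > expected:
--             break
--     return expected
-- ===== Notes on version B (the rewrite author's own statement) =====
-- stated objective: alternative
-- what changed: Replaces A's repeated membership probing (increment a counter while it is in the set) by one sort of the relevant elements followed by a single linear scan with an expected counter.
import Mathlib
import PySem

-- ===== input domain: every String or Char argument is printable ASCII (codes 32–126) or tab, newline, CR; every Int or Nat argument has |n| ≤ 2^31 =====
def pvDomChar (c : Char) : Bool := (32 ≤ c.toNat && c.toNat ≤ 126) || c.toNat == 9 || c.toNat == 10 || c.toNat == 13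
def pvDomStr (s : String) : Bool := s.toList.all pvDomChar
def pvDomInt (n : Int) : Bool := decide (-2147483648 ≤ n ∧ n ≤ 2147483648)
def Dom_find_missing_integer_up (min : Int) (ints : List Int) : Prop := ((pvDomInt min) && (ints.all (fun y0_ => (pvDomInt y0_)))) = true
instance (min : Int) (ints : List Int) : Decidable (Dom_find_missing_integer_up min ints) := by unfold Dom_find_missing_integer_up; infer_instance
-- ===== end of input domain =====

-- B replaces A's repeated membership probing of successive integers by one sort of the
-- elements above min followed by a single counting scan (objective: alternative).

-- ===== PORT A =====
-- A's while loop: `min` never changes, so the loop runs iff min < 1000001 and keeps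
-- incrementing min_ until min_ ∉ ints; termination: the count of elements ≥ min_ shrinks.
theorem pvCountMono (p q : Int → Bool) (hpq : ∀ x, p x = true → q x = true) (l : List Int) :
    (l.filter p).length ≤ (l.filter q).length := by
  induction l with
  | nil => simp
  | cons h t ih =>
    simp only [List.filter_cons]
    by_cases hp : p h = true
    · simp [hp, hpq h hp]; omega
    · by_cases hq : q h = true <;>
        simp [eq_false_of_ne_true hp, hq] <;> omega

theorem pvCountDec (p q : Int → Bool) (hpq : ∀ x, p x = true → q x = true)
    (m : Int) (l : List Int) (hm : m ∈ l) (hq : q m = true) (hp : p m = false) :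
    (l.filter p).length < (l.filter q).length := by
  induction l with
  | nil => simp at hm
  | cons h t ih =>
    simp only [List.filter_cons]
    rcases List.mem_cons.mp hm with rfl | hm'
    · simp [hp, hq]
      have := pvCountMono p q hpq t
      omega
    · have := ih hm'
      by_cases hph : p h = true
      · simp [hph, hpq h hph]; omega
      · by_cases hqh : q h = true <;>
          simp [eq_false_of_ne_true hph, hqh] <;> omega

def goA (ints : List Int) (m_ : Int) : Int :=
  if h : (m_ + 1) ∈ ints then goA ints (m_ + 1) else m_ + 1
termination_by (ints.filter (fun x => decide (m_ + 1 ≤ x))).length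
decreasing_by
  exact pvCountDec _ _ (fun x hx => by simp at hx ⊢; omega) (m_ + 1) ints h (by simp) (by simp)

def find_missing_integer_up (min : Int) (ints : List Int) : Option Int :=
  if min < 1000001 then some (goA ints min) else none

-- ===== PORT B =====
def goB (l : List Int) (e : Int) : Int :=
  match l with
  | [] => e
  | x :: rest => if x = e then goB rest (e + 1) else if x > e then e else goB rest e

def find_missing_integer_up_alt (min : Int) (ints : List Int) : Option Int :=
  if min ≥ 1000001 then none
  else some (goB (PySem.List.sorted (ints.filter (fun i => decide (i > min))) (fun x => x) false) (min + 1))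

-- ===== PRECONDITION & SPEC =====
def Spec_find_missing_integer_up (min : Int) (ints : List Int) (out : Option Int) : Prop := out = find_missing_integer_up_alt min ints
instance (min : Int) (ints : List Int) (out : Option Int) : Decidable (Spec_find_missing_integer_up min ints out) := by unfold Spec_find_missing_integer_up; infer_instance

-- ===== CLAIM (what is proved, stated in full; the proofs are below) =====
def Claim_equal_find_missing_integer_up : Prop := ∀ (min : Int) (ints : List Int), Dom_find_missing_integer_up min ints → Spec_find_missing_integer_up min ints (find_missing_integer_up min ints)

-- ===== LEMMAS AND PROOFS =====

-- goA ints m is the least integer > m that is not in ints.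
theorem goA_spec (ints : List Int) (m : Int) :
    m < goA ints m ∧ goA ints m ∉ ints ∧ ∀ k, m < k → k < goA ints m → k ∈ ints := by
  refine goA.induct ints
    (fun m => m < goA ints m ∧ goA ints m ∉ ints ∧ ∀ k, m < k → k < goA ints m → k ∈ ints)
    ?_ ?_ m
  · intro m h ih
    rw [goA, dif_pos h]
    refine ⟨by omega, ih.2.1, ?_⟩
    intro k hk1 hk2
    rcases lt_or_ge m (k - 1) with h' | h'
    · exact ih.2.2 k (by omega) hk2
    · have : k = m + 1 := by omega
      simpa [this] using h
  · intro m h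
    rw [goA, dif_neg h]
    exact ⟨by omega, h, by omega⟩

-- goB on a ≤-sorted list returns the least r ≥ e not in the list.
theorem goB_spec (l : List Int) (e : Int) (hs : l.Pairwise (· ≤ ·)) :
    e ≤ goB l e ∧ goB l e ∉ l ∧ ∀ k, e ≤ k → k < goB l e → k ∈ l := by
  induction l generalizing e with
  | nil => exact ⟨le_refl e, by simp [goB], by intro k h1 h2; simp [goB] at h2; omega⟩
  | cons x rest ih =>
    have hx : ∀ y ∈ rest, x ≤ y := (List.pairwise_cons.mp hs).1
    have hrest := (List.pairwise_cons.mp hs).2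
    by_cases hxe : x = e
    · subst hxe
      obtain ⟨ih1, ih2, ih3⟩ := ih (x + 1) hrest
      rw [show goB (x :: rest) x = goB rest (x + 1) from by simp [goB]]
      refine ⟨by omega, ?_, ?_⟩
      · intro hmem
        rcases List.mem_cons.mp hmem with h' | h'
        · omega
        · exact ih2 h'
      · intro k hk1 hk2
        rcases eq_or_lt_of_le hk1 with rfl | h'
        · exact List.mem_cons_self
        · exact List.mem_cons_of_mem _ (ih3 k (by omega) hk2)
    · by_cases hgt : x > e
      · simp only [goB, if_neg hxe, if_pos hgt]
        refine ⟨le_refl e, ?_, by intro k h1 h2; omega⟩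
        intro hmem
        rcases List.mem_cons.mp hmem with h' | h'
        · omega
        · have := hx e h'; omega
      · have hlt : x < e := by omega
        obtain ⟨ih1, ih2, ih3⟩ := ih e hrest
        rw [show goB (x :: rest) e = goB rest e from by simp [goB, hxe, hgt]]
        refine ⟨ih1, ?_, ?_⟩
        · intro hmem
          rcases List.mem_cons.mp hmem with h' | h'
          · omega
          · exact ih2 h'
        · intro k hk1 hk2
          exact List.mem_cons_of_mem _ (ih3 k hk1 hk2)

-- uniqueness of "least r > m not in ints"
theorem pvMainEq (ints : List Int) (m : Int) :
    goB (PySem.List.sorted (ints.filter (fun i => decide (i > m))) (fun x => x) false) (m + 1) = goA ints m := by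
  set l := PySem.List.sorted (ints.filter (fun i => decide (i > m))) (fun x => x) false with hl
  have hmem : ∀ r : Int, r ∈ l ↔ (r ∈ ints ∧ m < r) := by
    intro r
    rw [hl, PySem.List.mem_sorted, List.mem_filter]
    simp
  have hpw : l.Pairwise (· ≤ ·) := PySem.List.sorted_pairwise _ _
  obtain ⟨a1, a2, a3⟩ := goA_spec ints m
  obtain ⟨b1, b2, b3⟩ := goB_spec l (m + 1) hpw
  rcases lt_trichotomy (goB l (m + 1)) (goA ints m) with h | h | h
  · have := a3 _ (by omega) h
    exact absurd ((hmem _).mpr ⟨this, by omega⟩) b2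
  · exact h
  · have := b3 _ (by omega) h
    exact absurd ((hmem _).mp this).1 a2

-- ===== VERDICT (by name: the statement is the Claim_ definition above) =====
theorem find_missing_integer_up_spec : Claim_equal_find_missing_integer_up := by
  intro min ints _
  unfold Spec_find_missing_integer_up find_missing_integer_up find_missing_integer_up_alt
  by_cases h : min < 1000001
  · rw [if_pos h, if_neg (by omega)]
    exact congrArg some (pvMainEq ints min).symm
  · rw [if_neg h, if_pos (by omega)]
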